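-- pv_equiv track=rewrite | github.com/tburg0/mufc | scripts/publish_fighter.py | split_top_level_csv
-- ===== SOURCE A (Python) =====
-- def split_top_level_csv(value: str) -> list[str]:
--     parts = []
--     current = []
--     depth = 0
--     for ch in value:
--         if ch == "," and depth == 0:
--             parts.append("".join(current).strip())
--             current = []
--             continue
--         if ch == "(":
--             depth += 1
--         elif ch == ")" and depth > 0:
--             depth -= 1
--         current.append(ch)
--     parts.append("".join(current).strip())
--     return parts
-- ===== SOURCE B (Python) =====
-- def _find_top_comma(s):
--     depth = 0
--     for i, ch in enumerate(s):
--         if ch == "," and depth == 0: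
--             return i
--         if ch == "(":
--             depth += 1
--         elif ch == ")" and depth > 0:
--             depth -= 1
--     return None
--
--
-- def split_top_level_csv(value: str) -> list[str]:
--     parts = []
--     rest = value
--     while True:
--         i = _find_top_comma(rest)
--         if i is None:
--             parts.append(rest.strip())
--             return parts
--         parts.append(rest[:i].strip())
--         rest = rest[i + 1:]
-- ===== Notes on version B (the rewrite author's own statement) =====
-- stated objective: alternative
-- what changed: Instead of one pass accumulating characters into a buffer, B repeatedly locates the next top-level comma and builds each part by slicing and stripping the string between boundaries.
import Mathlib
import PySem

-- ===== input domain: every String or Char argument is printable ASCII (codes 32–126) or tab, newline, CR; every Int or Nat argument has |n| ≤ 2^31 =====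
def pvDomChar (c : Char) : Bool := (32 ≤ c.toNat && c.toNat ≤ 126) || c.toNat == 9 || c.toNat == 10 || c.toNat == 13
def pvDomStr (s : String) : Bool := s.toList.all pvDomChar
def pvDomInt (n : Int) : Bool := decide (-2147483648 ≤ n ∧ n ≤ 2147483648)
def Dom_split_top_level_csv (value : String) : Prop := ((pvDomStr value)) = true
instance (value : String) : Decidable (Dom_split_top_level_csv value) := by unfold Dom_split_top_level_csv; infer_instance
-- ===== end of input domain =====

-- B replaces A's single buffer-accumulating pass by repeated search for the next top-level
-- comma plus slice-and-strip of each segment (objective: alternative, same cost).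

-- ===== PORT A =====
-- A's for-loop over characters with state (parts, current, depth); the final append is done after.
def splitLoopA : List Char → List String → List Char → Int → List String × List Char
  | [], parts, current, _depth => (parts, current)
  | c :: cs, parts, current, depth =>
    if c = ',' ∧ depth = 0 then
      splitLoopA cs (parts ++ [PySem.Str.strip (String.ofList current)]) [] depth
    else
      splitLoopA cs parts (current ++ [c])
        (if c = '(' then depth + 1 else if c = ')' ∧ depth > 0 then depth - 1 else depth)

def split_top_level_csv (value : String) : List String :=
  let st := splitLoopA value.toList [] [] 0
  st.1 ++ [PySem.Str.strip (String.ofList st.2)]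

-- ===== PORT B =====
-- B's helper _find_top_comma: index of the first depth-0 comma, or none.
def findTopComma : List Char → Int → Option Nat
  | [], _ => none
  | c :: cs, depth =>
    if c = ',' ∧ depth = 0 then some 0
    else (findTopComma cs
        (if c = '(' then depth + 1 else if c = ')' ∧ depth > 0 then depth - 1 else depth)).map (· + 1)

-- needed by splitLoopB's decreasing_by
theorem findTopComma_ne_nil {rest : List Char} {d : Int} {i : Nat}
    (h : findTopComma rest d = some i) : rest ≠ [] := by
  intro hnil; subst hnil; simp [findTopComma] at h

-- B's while loop: slice off the part before the next top-level comma, repeat on the remainder.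
def splitLoopB (rest : List Char) (parts : List String) : List String :=
  match _h : findTopComma rest 0 with
  | none => parts ++ [PySem.Str.strip (String.ofList rest)]
  | some i => splitLoopB (rest.drop (i + 1)) (parts ++ [PySem.Str.strip (String.ofList (rest.take i))])
termination_by rest.length
decreasing_by
  have := findTopComma_ne_nil _h
  have : 0 < rest.length := List.length_pos_iff.mpr this
  simp [List.length_drop]; omega

def split_top_level_csv_alt (value : String) : List String := splitLoopB value.toList []

-- ===== PRECONDITION & SPEC =====
def Spec_split_top_level_csv (value : String) (out : List String) : Prop := out = split_top_level_csv_alt value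
instance (value : String) (out : List String) : Decidable (Spec_split_top_level_csv value out) := by unfold Spec_split_top_level_csv; infer_instance

-- ===== CLAIM (what is proved, stated in full; the proofs are below) =====
def Claim_equal_split_top_level_csv : Prop := ∀ (value : String), Dom_split_top_level_csv value → Spec_split_top_level_csv value (split_top_level_csv value)

-- ===== LEMMAS AND PROOFS =====

-- accumulator lemma for B's loop
theorem splitLoopB_acc (rest : List Char) (p : List String) :
    splitLoopB rest p = p ++ splitLoopB rest [] := by
  induction hn : rest.length using Nat.strong_induction_on generalizing rest p with
  | _ n ih =>
    rw [splitLoopB, splitLoopB]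
    cases hf : findTopComma rest 0 with
    | none => simp
    | some i =>
      have hne := findTopComma_ne_nil hf
      have hpos : 0 < rest.length := List.length_pos_iff.mpr hne
      have e1 := ih ((rest.drop (i + 1)).length) (by simp [List.length_drop]; omega)
        (rest.drop (i + 1)) (p ++ [PySem.Str.strip (String.ofList (rest.take i))]) rfl
      have e2 := ih ((rest.drop (i + 1)).length) (by simp [List.length_drop]; omega)
        (rest.drop (i + 1)) ([PySem.Str.strip (String.ofList (rest.take i))]) rfl
      simp [e1, e2]

-- "the rest of the output from state (current, depth)" as B computes it
def segQ (current : List Char) (depth : Int) (rest : List Char) : List String :=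
  match findTopComma rest depth with
  | none => [PySem.Str.strip (String.ofList (current ++ rest))]
  | some i =>
      PySem.Str.strip (String.ofList (current ++ rest.take i)) :: splitLoopB (rest.drop (i + 1)) []

theorem splitLoopB_eq_segQ (cs : List Char) : splitLoopB cs [] = segQ [] 0 cs := by
  rw [splitLoopB, segQ]
  cases hf : findTopComma cs 0 with
  | none => simp
  | some i =>
    have e := splitLoopB_acc (cs.drop (i + 1)) [PySem.Str.strip (String.ofList (cs.take i))]
    simp [e]

theorem splitLoopA_eq_segQ (rest : List Char) :
    ∀ (parts : List String) (current : List Char) (depth : Int),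
      (splitLoopA rest parts current depth).1 ++
        [PySem.Str.strip (String.ofList (splitLoopA rest parts current depth).2)]
      = parts ++ segQ current depth rest := by
  induction rest with
  | nil => intro parts current depth; simp [splitLoopA, segQ, findTopComma]
  | cons c cs ih =>
    intro parts current depth
    by_cases hc : c = ',' ∧ depth = 0
    · rw [show splitLoopA (c :: cs) parts current depth
            = splitLoopA cs (parts ++ [PySem.Str.strip (String.ofList current)]) [] depth
          from by simp [splitLoopA, hc]]
      rw [ih]
      obtain ⟨hc1, hc2⟩ := hc; subst hc1; subst hc2
      rw [show segQ current 0 (',' :: cs)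
            = PySem.Str.strip (String.ofList current) :: splitLoopB cs []
          from by simp [segQ, findTopComma]]
      rw [splitLoopB_eq_segQ]
      simp
    · rw [show splitLoopA (c :: cs) parts current depth
            = splitLoopA cs parts (current ++ [c])
                (if c = '(' then depth + 1 else if c = ')' ∧ depth > 0 then depth - 1 else depth)
          from by simp [splitLoopA, hc]]
      rw [ih]
      congr 1
      simp only [segQ]
      rw [show findTopComma (c :: cs) depth
            = (findTopComma cs
                (if c = '(' then depth + 1 else if c = ')' ∧ depth > 0 then depth - 1 else depth)).map
                (· + 1)
          from by simp [findTopComma, hc]]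
      cases hf : findTopComma cs
          (if c = '(' then depth + 1 else if c = ')' ∧ depth > 0 then depth - 1 else depth) with
      | none => simp
      | some i => simp [List.take_succ_cons, List.drop_succ_cons]

-- ===== VERDICT (by name: the statement is the Claim_ definition above) =====
theorem split_top_level_csv_spec : Claim_equal_split_top_level_csv := by
  intro value _
  unfold Spec_split_top_level_csv split_top_level_csv split_top_level_csv_alt
  rw [splitLoopB_eq_segQ]
  simpa using splitLoopA_eq_segQ value.toList [] [] 0
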